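-- pv_equiv track=rewrite | github.com/sueszli/vector-database-benchmark | dataset/python-mutated/nested_control_flow_test.py | while_break_in_try
-- ===== SOURCE A (Python) =====
-- def while_break_in_try(x):
--     if False:
--         i = 10
--         return i + 15
--     z = 0
--     while x > 0:
--         x = x - 1
--         try:
--             if x < 5:
--                 break
--             z = z + 1
--         finally:
--             z = z + 10
--     return z
-- ===== SOURCE B (Python) =====
-- def while_break_in_try(x):
--     if x <= 0:
--         return 0
--     if x <= 5:
--         return 10
--     return 11 * (x - 5) + 10
-- ===== Notes on version B (the rewrite author's own statement) =====
-- stated objective: faster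
-- what changed: Replaced the decrement-until-break while loop by a closed-form arithmetic formula computed by a three-way case split on x.
import Mathlib
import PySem

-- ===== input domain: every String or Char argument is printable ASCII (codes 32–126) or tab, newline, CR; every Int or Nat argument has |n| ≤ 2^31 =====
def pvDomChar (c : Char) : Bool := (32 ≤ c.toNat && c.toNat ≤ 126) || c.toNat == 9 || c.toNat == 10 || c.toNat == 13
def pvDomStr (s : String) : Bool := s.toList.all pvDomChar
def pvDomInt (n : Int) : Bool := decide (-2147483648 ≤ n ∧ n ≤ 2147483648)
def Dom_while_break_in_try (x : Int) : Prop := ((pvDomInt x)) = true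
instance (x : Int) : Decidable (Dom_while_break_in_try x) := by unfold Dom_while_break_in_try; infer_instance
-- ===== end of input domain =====

-- B: closed-form arithmetic formula instead of the decrement loop.
-- ===== PORT A =====
-- loop state: (x, z); each iteration decrements x, then finally adds 10 to z (plus 1 before, unless breaking)
def whileLoopA (x z : Int) : Int :=
  if h : x > 0 then
    if x - 1 < 5 then z + 10
    else whileLoopA (x - 1) (z + 1 + 10)
  else z
termination_by x.toNat
decreasing_by omega

def while_break_in_try (x : Int) : Int := whileLoopA x 0

-- ===== PORT B =====
def while_break_in_try_alt (x : Int) : Int :=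
  if x ≤ 0 then 0
  else if x ≤ 5 then 10
  else 11 * (x - 5) + 10

-- ===== PRECONDITION & SPEC =====
def Spec_while_break_in_try (x : Int) (out : Int) : Prop := out = while_break_in_try_alt x
instance (x : Int) (out : Int) : Decidable (Spec_while_break_in_try x out) := by unfold Spec_while_break_in_try; infer_instance

-- ===== CLAIM (what is proved, stated in full; the proofs are below) =====
def Claim_equal_while_break_in_try : Prop := ∀ (x : Int), Dom_while_break_in_try x → Spec_while_break_in_try x (while_break_in_try x)

-- ===== LEMMAS AND PROOFS =====

-- ===== VERDICT (by name: the statement is the Claim_ definition above) =====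
-- invariant: for x > 5, the loop returns z + 11*(x-5) + 10; for 0 < x ≤ 5 it returns z + 10
theorem whileLoopA_eq (x z : Int) :
    whileLoopA x z = if x ≤ 0 then z else if x ≤ 5 then z + 10 else z + 11 * (x - 5) + 10 := by
  induction x, z using whileLoopA.induct with
  | case1 x z h h2 =>
    rw [whileLoopA, dif_pos h, if_pos h2]
    split_ifs <;> omega
  | case2 x z h h2 ih =>
    rw [whileLoopA, dif_pos h, if_neg h2, ih]
    split_ifs <;> omega
  | case3 x z h =>
    rw [whileLoopA, dif_neg h]
    split_ifs <;> omega

theorem while_break_in_try_spec : Claim_equal_while_break_in_try := by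
  intro x _
  unfold Spec_while_break_in_try while_break_in_try while_break_in_try_alt
  rw [whileLoopA_eq]
  split_ifs <;> omega
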